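-- pv_equiv track=rewrite | github.com/anikaht/EE488-Computer-Architecture | Assignment6/mult4.py | mult4_shiftadd
-- ===== SOURCE A (Python) =====
-- def mult4_shiftadd(x: int, y: int) -> int:
--     """
--     4-bit unsigned shift-add multiplier (Version 1).
--     Implements:
--       for i in 0..3:
--         if y[i] == 1: product += (x << i)
--       shift y right each cycle.
--     Returns 8-bit product of x * y (0..15 × 0..15 → 0..255).
--     """
--     mcand = x & 0xF     # 4-bit multiplicand
--     mult  = y & 0xF     # 4-bit multiplier
--     prod  = 0
--     for _ in range(4):
--         if mult & 1:
--             prod += mcand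
--         mcand <<= 1
--         mult  >>= 1
--     return prod & 0xFF  # mask to 8 bits
-- ===== SOURCE B (Python) =====
-- def mult4_shiftadd(x: int, y: int) -> int:
--     """Closed form: mask both operands to 4 bits, multiply, mask to 8 bits."""
--     return ((x & 0xF) * (y & 0xF)) & 0xFF
-- ===== Notes on version B (the rewrite author's own statement) =====
-- stated objective: simpler
-- what changed: Replaced the 4-iteration shift-add loop with the closed-form masked product ((x & 0xF) * (y & 0xF)) & 0xFF.
import Mathlib
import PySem

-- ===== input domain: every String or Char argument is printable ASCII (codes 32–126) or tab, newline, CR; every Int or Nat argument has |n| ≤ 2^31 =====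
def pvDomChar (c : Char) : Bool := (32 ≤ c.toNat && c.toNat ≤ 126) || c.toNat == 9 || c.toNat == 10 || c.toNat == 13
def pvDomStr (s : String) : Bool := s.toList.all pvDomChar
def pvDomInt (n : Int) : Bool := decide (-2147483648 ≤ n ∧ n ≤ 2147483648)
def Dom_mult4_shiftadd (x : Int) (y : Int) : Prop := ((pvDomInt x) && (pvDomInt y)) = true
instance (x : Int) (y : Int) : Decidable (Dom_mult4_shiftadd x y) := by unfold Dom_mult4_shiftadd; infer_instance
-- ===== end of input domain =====

-- B replaces A's 4-iteration shift-add loop with the closed-form masked product ((x & 0xF) * (y & 0xF)) & 0xFF (simpler).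


-- ===== PORT A =====
-- literal port of A: mask operands to 4 bits, then 4 loop iterations of
-- conditional add, left-shift of mcand (×2) and right-shift of mult (floordiv 2)
def mult4_shiftadd (x : Int) (y : Int) : Int :=
  let mcand := PySem.Int.band x 15
  let mult := PySem.Int.band y 15
  let s := (List.range 4).foldl
    (fun (s : Int × Int × Int) (_ : Nat) =>
      let prod := if PySem.Int.band s.2.2 1 ≠ 0 then s.1 + s.2.1 else s.1
      (prod, s.2.1 * 2, PySem.Int.floordiv s.2.2 2))
    (0, mcand, mult)
  PySem.Int.band s.1 255

-- ===== PORT B =====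
def mult4_shiftadd_alt (x : Int) (y : Int) : Int :=
  PySem.Int.band (PySem.Int.band x 15 * PySem.Int.band y 15) 255

-- ===== PRECONDITION & SPEC =====
def Spec_mult4_shiftadd (x : Int) (y : Int) (out : Int) : Prop := out = mult4_shiftadd_alt x y
instance (x : Int) (y : Int) (out : Int) : Decidable (Spec_mult4_shiftadd x y out) := by unfold Spec_mult4_shiftadd; infer_instance

-- ===== CLAIM (what is proved, stated in full; the proofs are below) =====
def Claim_equal_mult4_shiftadd : Prop := ∀ (x : Int) (y : Int), Dom_mult4_shiftadd x y → Spec_mult4_shiftadd x y (mult4_shiftadd x y)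

-- ===== LEMMAS AND PROOFS =====

-- a & 15 always lands in [0, 15], for negative a too (Python's infinite two's complement)
theorem band15_bounds (a : Int) : 0 ≤ PySem.Int.band a 15 ∧ PySem.Int.band a 15 ≤ 15 := by
  unfold PySem.Int.band
  split_ifs with h1 h2 h2
  · have := Nat.and_le_right (n := a.toNat) (m := (15:Int).toNat)
    constructor <;> [positivity; exact_mod_cast (by simpa using this)]
  · omega
  · have hle : (15:Int).toNat &&& (-a - 1).toNat ≤ (15:Int).toNat := Nat.and_le_left
    omega
  · omega

-- both ports depend on the inputs only through a = x & 15 and b = y & 15;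
-- on 0 ≤ a,b ≤ 15 the shift-add loop computes the masked product
theorem mult4_core (a b : Int) (ha0 : 0 ≤ a) (ha : a ≤ 15) (hb0 : 0 ≤ b) (hb : b ≤ 15) :
    PySem.Int.band
      ((List.range 4).foldl
        (fun (s : Int × Int × Int) (_ : Nat) =>
          let prod := if PySem.Int.band s.2.2 1 ≠ 0 then s.1 + s.2.1 else s.1
          (prod, s.2.1 * 2, PySem.Int.floordiv s.2.2 2))
        (0, a, b)).1 255
    = PySem.Int.band (a * b) 255 := by
  interval_cases a <;> interval_cases b <;> decide

-- ===== VERDICT (by name: the statement is the Claim_ definition above) =====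
theorem mult4_shiftadd_spec : Claim_equal_mult4_shiftadd := by
  intro x y _
  unfold Spec_mult4_shiftadd mult4_shiftadd mult4_shiftadd_alt
  obtain ⟨ha0, ha⟩ := band15_bounds x
  obtain ⟨hb0, hb⟩ := band15_bounds y
  exact mult4_core _ _ ha0 ha hb0 hb
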